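-- pv_equiv track=rewrite | github.com/SuperInstance/nexus-runtime | jetson/maritime_domain/ais.py | classify_vessel_type
-- ===== SOURCE A (Python) =====
-- def classify_vessel_type(type_code: int) -> str:
--     """
--     Classify a vessel by its AIS type code into a human-readable category.
--     Returns one of: 'Cargo', 'Tanker', 'Passenger', 'Fishing', 'Tug',
--     'Pilot', 'SAR', 'Pleasure', 'Military', 'Sailing', 'High Speed',
--     'Dredger', 'Law Enforcement', 'Unknown', 'Not Available'.
--     """
--     classification = {
--         (0,): 'Not Available',
--         (1, 2, 3, 4, 5, 6): 'Reserved',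
--         (7,): 'Cargo',
--         (8,): 'Tanker',
--         (9,): 'Cargo',
--         (10,): 'Fishing',
--         (11,): 'Tug',
--         (12,): 'Pilot',
--         (13,): 'SAR',
--         (14,): 'Pleasure',
--         (15,): 'High Speed',
--         (16, 17): 'High Speed',
--         (18,): 'Sailing',
--         (19,): 'Reserved',
--         (20,): 'Pleasure',
--         (21, 22, 23, 24, 25, 26, 27, 28, 29): 'Cargo',
--         (30,): 'Dredger',
--         (31,): 'Dredger',
--         (32,): 'Sailing',
--         (33,): 'Pleasure',
--         (34,): 'Law Enforcement',
--         (35, 36, 37, 38, 39, 40, 41, 42, 43, 44, 45, 46, 47, 48, 49): 'SAR',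
--         (50,): 'Pilot',
--         (51, 52, 53, 54, 55, 56, 57, 58, 59): 'SAR',
--         (60,): 'Pilot',
--         (61,): 'Pleasure',
--         (62,): 'Sailing',
--         (63,): 'Reserved',
--         (64,): 'High Speed',
--         (65,): 'High Speed',
--         (66,): 'High Speed',
--         (67,): 'Cargo',
--         (68,): 'Cargo',
--         (69,): 'Cargo',
--         (70,): 'Cargo',
--         (71,): 'Cargo',
--         (72,): 'Cargo',
--         (73,): 'Cargo',
--         (74,): 'Cargo',
--         (75,): 'Cargo',
--         (76,): 'Cargo',
--         (77,): 'Cargo',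
--         (78,): 'Cargo',
--         (79,): 'Cargo',
--         (80,): 'Tanker',
--         (81,): 'Tanker',
--         (82,): 'Tanker',
--         (83,): 'Tanker',
--         (84,): 'Tanker',
--         (85,): 'Tanker',
--         (86,): 'Tanker',
--         (87,): 'Tanker',
--         (88,): 'Tanker',
--         (89,): 'Tanker',
--     }
--     for codes, category in classification.items():
--         if type_code in codes:
--             return category
--
--     # Broader ranges
--     if 90 <= type_code <= 99:
--         return 'Unknown'
--     return 'Unknown'
-- ===== SOURCE B (Python) =====
-- # B: direct O(1) lookup — a flat code string (one character per code) indexed by type_code,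
-- # each hex digit selecting a category name; codes outside the string map to Unknown; no scan, no comparisons ladder.
-- _CATEGORIES = ['Not Available', 'Reserved', 'Cargo', 'Tanker', 'Fishing',
--                'Tug', 'Pilot', 'SAR', 'Pleasure', 'High Speed', 'Sailing',
--                'Dredger', 'Law Enforcement']
-- _CODEMAP = "011111123245678999A18222222222BBA8C777777777777777677777777768A199922222222222223333333333"
--
-- def classify_vessel_type(type_code: int) -> str:
--     if 0 <= type_code < 90:
--         return _CATEGORIES[int(_CODEMAP[type_code], 16)]
--     return 'Unknown'
-- ===== Notes on version B (the rewrite author's own statement) =====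
-- stated objective: alternative
-- what changed: Replaced the tuple-keyed dict built per call and its linear membership-scan loop by a direct O(1) indexed lookup: a flat code string (one character per code) indexed by type_code whose hex digit selects the category from a fixed names list.
import Mathlib
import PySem

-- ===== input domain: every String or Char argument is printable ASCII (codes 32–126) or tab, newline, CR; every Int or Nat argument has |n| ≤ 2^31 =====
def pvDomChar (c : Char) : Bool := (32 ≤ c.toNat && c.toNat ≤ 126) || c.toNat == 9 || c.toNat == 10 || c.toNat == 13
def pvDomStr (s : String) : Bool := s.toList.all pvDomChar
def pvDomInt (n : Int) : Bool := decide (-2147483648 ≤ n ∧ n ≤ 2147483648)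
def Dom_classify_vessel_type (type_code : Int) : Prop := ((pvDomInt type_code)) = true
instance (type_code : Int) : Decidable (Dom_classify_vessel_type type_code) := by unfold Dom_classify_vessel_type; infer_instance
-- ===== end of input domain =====

-- B replaces A's per-call tuple-keyed dict and its linear membership-scan by a direct
-- indexed lookup into a flat code string (one character per code) (objective: alternative; same value).

-- ===== PORT A =====
-- A's dict literal: insertion-ordered items, tuple keys ported as lists of codes.
def aisTable : List (List Int × String) :=
  [([0], "Not Available"),
   ([1, 2, 3, 4, 5, 6], "Reserved"),
   ([7], "Cargo"),
   ([8], "Tanker"),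
   ([9], "Cargo"),
   ([10], "Fishing"),
   ([11], "Tug"),
   ([12], "Pilot"),
   ([13], "SAR"),
   ([14], "Pleasure"),
   ([15], "High Speed"),
   ([16, 17], "High Speed"),
   ([18], "Sailing"),
   ([19], "Reserved"),
   ([20], "Pleasure"),
   ([21, 22, 23, 24, 25, 26, 27, 28, 29], "Cargo"),
   ([30], "Dredger"),
   ([31], "Dredger"),
   ([32], "Sailing"),
   ([33], "Pleasure"),
   ([34], "Law Enforcement"),
   ([35, 36, 37, 38, 39, 40, 41, 42, 43, 44, 45, 46, 47, 48, 49], "SAR"),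
   ([50], "Pilot"),
   ([51, 52, 53, 54, 55, 56, 57, 58, 59], "SAR"),
   ([60], "Pilot"),
   ([61], "Pleasure"),
   ([62], "Sailing"),
   ([63], "Reserved"),
   ([64], "High Speed"),
   ([65], "High Speed"),
   ([66], "High Speed"),
   ([67], "Cargo"),
   ([68], "Cargo"),
   ([69], "Cargo"),
   ([70], "Cargo"),
   ([71], "Cargo"),
   ([72], "Cargo"),
   ([73], "Cargo"),
   ([74], "Cargo"),
   ([75], "Cargo"),
   ([76], "Cargo"),
   ([77], "Cargo"),
   ([78], "Cargo"),
   ([79], "Cargo"),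
   ([80], "Tanker"),
   ([81], "Tanker"),
   ([82], "Tanker"),
   ([83], "Tanker"),
   ([84], "Tanker"),
   ([85], "Tanker"),
   ([86], "Tanker"),
   ([87], "Tanker"),
   ([88], "Tanker"),
   ([89], "Tanker")]

-- A's loop: first items entry whose codes tuple contains type_code.
def aisScan (type_code : Int) : List (List Int × String) → Option String
  | [] => none
  | (codes, category) :: rest =>
      if codes.contains type_code then some category else aisScan type_code rest

def classify_vessel_type (type_code : Int) : String :=
  match aisScan type_code aisTable with
  | some category => category
  | none => if 90 ≤ type_code ∧ type_code ≤ 99 then "Unknown" else "Unknown"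

-- ===== PORT B =====
def altCategories : List String :=
  ["Not Available", "Reserved", "Cargo", "Tanker", "Fishing",
   "Tug", "Pilot", "SAR", "Pleasure", "High Speed", "Sailing",
   "Dredger", "Law Enforcement"]

def altCodeMap : String :=
  "011111123245678999A18222222222BBA8C777777777777777677777777768A199922222222222223333333333"

-- int(ch, 16) ported by hand for a single digit: exact on '0'-'9' and 'A'-'F',
-- the only characters _CODEMAP contains.
def hexVal (c : Char) : Int :=
  if c.toNat ≤ 57 then (c.toNat : Int) - 48 else (c.toNat : Int) - 55

def classify_vessel_type_alt (type_code : Int) : String :=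
  if 0 ≤ type_code ∧ type_code < 90 then
    match PySem.Str.pyGet? altCodeMap type_code with
    | some c => (PySem.List.pyGet? altCategories (hexVal c)).getD "Unknown"
        -- both indexings are in range in Python whenever this branch runs,
        -- so the none/getD defaults are unreachable
    | none => "Unknown"
  else "Unknown"

-- ===== PRECONDITION & SPEC =====
def Spec_classify_vessel_type (type_code : Int) (out : String) : Prop := out = classify_vessel_type_alt type_code
instance (type_code : Int) (out : String) : Decidable (Spec_classify_vessel_type type_code out) := by unfold Spec_classify_vessel_type; infer_instance

-- ===== CLAIM =====
def Claim_equal_classify_vessel_type : Prop := ∀ (type_code : Int), Dom_classify_vessel_type type_code → Spec_classify_vessel_type type_code (classify_vessel_type type_code)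

-- ===== LEMMAS AND PROOFS =====

-- If every code in the table lies in [0,89] and c does not, A's scan finds nothing.
theorem aisScan_none (c : Int) (h : c < 0 ∨ 89 < c) :
    ∀ l : List (List Int × String),
      (∀ p ∈ l, ∀ k ∈ p.1, 0 ≤ k ∧ k ≤ 89) → aisScan c l = none := by
  intro l
  induction l with
  | nil => intro _; rfl
  | cons p rest ih =>
    intro hall
    rcases p with ⟨codes, category⟩
    have hc : codes.contains c = false := by
      rw [Bool.eq_false_iff]
      intro hcc
      have hkm : c ∈ codes := by simpa using hcc
      have := hall _ (List.mem_cons_self ..) c hkm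
      omega
    simp only [aisScan, hc, Bool.false_eq_true, if_false]
    exact ih (fun p hp => hall p (List.mem_cons_of_mem _ hp))

theorem aisTable_bounded : ∀ p ∈ aisTable, ∀ k ∈ p.1, 0 ≤ k ∧ (k : Int) ≤ 89 := by decide

-- Outside 0..89 A's scan finds nothing and B's guard fails: both return "Unknown".
theorem classify_out_of_range (c : Int) (h : c < 0 ∨ 89 < c) :
    classify_vessel_type c = classify_vessel_type_alt c := by
  have hA : classify_vessel_type c = "Unknown" := by
    unfold classify_vessel_type
    rw [aisScan_none c h aisTable aisTable_bounded]
    split_ifs <;> rfl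
  have hB : classify_vessel_type_alt c = "Unknown" := by
    unfold classify_vessel_type_alt
    rw [if_neg (by omega)]
  rw [hA, hB]

-- ===== VERDICT =====
theorem classify_vessel_type_spec : Claim_equal_classify_vessel_type := by
  intro c _
  unfold Spec_classify_vessel_type
  by_cases h : 0 ≤ c ∧ c ≤ 89
  · obtain ⟨h0, h9⟩ := h
    interval_cases c <;> decide
  · exact classify_out_of_range c (by omega)
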